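-- pv_equiv track=rewrite | github.com/jerry8137/git-massage | src/git_massage/git.py | _filter_diff_noise
-- ===== SOURCE A (Python) =====
-- def _filter_diff_noise(diff: str) -> str:
--     """
--     Filter out noise from git diff:
--     1. Binary files - keep only the 'Binary files ... differ' line
--     2. Deleted files - keep only filename and marker, strip diff content
--     """
--     if not diff:
--         return diff
--
--     lines = diff.split("\n")
--     result = []
--     i = 0
--
--     while i < len(lines):
--         line = lines[i]
--
--         # Binary files already show as "Binary files a/file and b/file differ"
--         # Just keep this line and continue
--         if line.startswith("Binary files"):
--             result.append(line)
--             i += 1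
--             continue
--
--         # Detect deleted files: "diff --git a/file b/file" followed by "deleted file mode"
--         if line.startswith("diff --git"):
--             # Look ahead to see if this is a deletion
--             j = i + 1
--             is_deletion = False
--             while j < len(lines) and j < i + 10:  # Check next ~10 lines
--                 if lines[j].startswith("deleted file mode"):
--                     is_deletion = True
--                     break
--                 if lines[j].startswith("diff --git"):  # Next file
--                     break
--                 j += 1
--
--             if is_deletion:
--                 # Include only the diff header and deleted marker
--                 result.append(line)  # diff --git line
--                 result.append("deleted file mode (content omitted)")
--                 # Skip all lines until next diff or end
--                 i += 1
--                 while i < len(lines) and not lines[i].startswith("diff --git"):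
--                     i += 1
--                 continue
--
--         result.append(line)
--         i += 1
--
--     return "\n".join(result)
-- ===== SOURCE B (Python) =====
-- def _filter_diff_noise(diff: str) -> str:
--     """Segment the diff at 'diff --git' headers, then decide each segment independently."""
--     if not diff:
--         return diff
--
--     lines = diff.split("\n")
--
--     # Split into segments: lines before the first header form the leading segment;
--     # every 'diff --git' line starts a new one.
--     segments = []
--     k = 0
--     while k < len(lines):
--         end = k + 1
--         while end < len(lines) and not lines[end].startswith("diff --git"):
--             end += 1
--         segments.append(lines[k:end])
--         k = end
--
--     out = []
--     for seg in segments: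
--         if seg[0].startswith("diff --git") and any(
--             l.startswith("deleted file mode") for l in seg[1:10]
--         ):
--             out.append(seg[0])
--             out.append("deleted file mode (content omitted)")
--         else:
--             out.extend(seg)
--     return "\n".join(out)
-- ===== Notes on version B (the rewrite author's own statement) =====
-- stated objective: simpler
-- what changed: Replaces A's single stateful index scan with its look-ahead and skip-forward inner loops by a two-phase decomposition: first split the lines into segments at each 'diff --git' header, then decide each segment independently (collapse it if any of its lines 1..9 says 'deleted file mode', else emit it verbatim).
import Mathlib
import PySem

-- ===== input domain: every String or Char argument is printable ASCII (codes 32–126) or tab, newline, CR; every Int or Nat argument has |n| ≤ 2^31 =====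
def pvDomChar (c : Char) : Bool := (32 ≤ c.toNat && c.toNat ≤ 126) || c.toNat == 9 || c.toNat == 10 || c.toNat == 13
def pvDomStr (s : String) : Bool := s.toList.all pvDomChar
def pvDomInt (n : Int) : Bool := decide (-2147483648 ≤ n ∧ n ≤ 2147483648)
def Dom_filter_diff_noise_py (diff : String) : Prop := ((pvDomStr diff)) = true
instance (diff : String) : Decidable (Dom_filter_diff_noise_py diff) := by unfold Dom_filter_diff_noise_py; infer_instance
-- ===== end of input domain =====

-- B replaces A's stateful index scan (look-ahead + skip-forward inner loops) by a two-phase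
-- decomposition — split into 'diff --git' segments, then decide each segment independently
-- (objective: simpler).

-- ===== PORT A =====
-- inner look-ahead loop: 'while j < len(lines) and j < i + 10', fuel = remaining window (9)
def pvALook : List String → Nat → Bool
  | _, 0 => false
  | [], _ + 1 => false
  | l :: ls, n + 1 =>
    if PySem.Str.startswith l "deleted file mode" then true
    else if PySem.Str.startswith l "diff --git" then false
    else pvALook ls n

-- skip loop: 'while i < len(lines) and not lines[i].startswith("diff --git"): i += 1'
def pvASkip : List String → List String
  | [] => []
  | l :: ls => if PySem.Str.startswith l "diff --git" then l :: ls else pvASkip ls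

theorem pvASkip_length_le (ls : List String) : (pvASkip ls).length ≤ ls.length := by
  induction ls with
  | nil => simp [pvASkip]
  | cons l ls ih =>
    simp only [pvASkip]
    split
    · exact Nat.le_refl _
    · exact Nat.le_succ_of_le ih

-- the outer 'while i < len(lines)' loop of A, over the remaining suffix of lines
def pvAScan : List String → List String
  | [] => []
  | l :: ls =>
    if PySem.Str.startswith l "Binary files" then l :: pvAScan ls
    else if PySem.Str.startswith l "diff --git" then
      if pvALook ls 9 then
        l :: "deleted file mode (content omitted)" :: pvAScan (pvASkip ls)
      else l :: pvAScan ls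
    else l :: pvAScan ls
  termination_by ls => ls.length
  decreasing_by
  all_goals simp only [List.length_cons]
  all_goals first
    | exact Nat.lt_succ_of_le (pvASkip_length_le ls)
    | omega

def filter_diff_noise_py (diff : String) : String :=
  if diff = "" then diff
  else PySem.Str.join "\n" (pvAScan ((PySem.Str.split? diff "\n").getD []))

-- ===== PORT B =====
-- the segment splitter of B: each segment is its first line plus the following non-header lines
def pvBSegs : List String → List (List String)
  | [] => []
  | l :: ls =>
    (l :: ls.takeWhile (fun x => !PySem.Str.startswith x "diff --git"))
      :: pvBSegs (ls.dropWhile (fun x => !PySem.Str.startswith x "diff --git"))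
  termination_by ls => ls.length
  decreasing_by
    exact Nat.lt_succ_of_le (List.length_dropWhile_le _ _)

-- the per-segment decision of B
def pvBProc (seg : List String) : List String :=
  match seg with
  | [] => []
  | h :: body =>
    if PySem.Str.startswith h "diff --git"
        && (body.take 9).any (fun l => PySem.Str.startswith l "deleted file mode") then
      [h, "deleted file mode (content omitted)"]
    else h :: body

def filter_diff_noise_py_alt (diff : String) : String :=
  if diff = "" then diff
  else PySem.Str.join "\n" ((pvBSegs ((PySem.Str.split? diff "\n").getD [])).flatMap pvBProc)

-- ===== PRECONDITION & SPEC =====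
def Spec_filter_diff_noise_py (diff : String) (out : String) : Prop := out = filter_diff_noise_py_alt diff
instance (diff : String) (out : String) : Decidable (Spec_filter_diff_noise_py diff out) := by unfold Spec_filter_diff_noise_py; infer_instance

-- ===== CLAIM (what is proved, stated in full; the proofs are below) =====
def Claim_equal_filter_diff_noise_py : Prop := ∀ (diff : String), Dom_filter_diff_noise_py diff → Spec_filter_diff_noise_py diff (filter_diff_noise_py diff)

-- ===== LEMMAS AND PROOFS =====

-- a line starting with "deleted file mode" does not start with "diff --git"
theorem pv_del_not_hdr (l : String)
    (h : PySem.Str.startswith l "deleted file mode" = true) :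
    PySem.Str.startswith l "diff --git" = false := by
  simp only [PySem.Str.startswith_eq] at *
  rw [PySem.Chars.startswith_iff] at h
  by_contra hc
  rw [Bool.not_eq_false, PySem.Chars.startswith_iff] at hc
  obtain ⟨t1, h1⟩ := h
  obtain ⟨t2, h2⟩ := hc
  have e1 : ("deleted file mode" : String).toList
      = ['d','e','l','e','t','e','d',' ','f','i','l','e',' ','m','o','d','e'] := rfl
  have e2 : ("diff --git" : String).toList = ['d','i','f','f',' ','-','-','g','i','t'] := rfl
  rw [e1] at h1
  rw [e2] at h2
  have := h1.trans h2.symm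
  simp at this

-- the look-ahead equals 'any deleted among the first 9 lines of the segment body'
theorem pvALook_eq (ls : List String) (n : Nat) :
    pvALook ls n
      = ((ls.takeWhile (fun x => !PySem.Str.startswith x "diff --git")).take n).any
          (fun l => PySem.Str.startswith l "deleted file mode") := by
  induction ls generalizing n with
  | nil => cases n <;> simp [pvALook]
  | cons l ls ih =>
    cases n with
    | zero => simp [pvALook]
    | succ n =>
      simp only [pvALook, List.takeWhile_cons]
      by_cases hd : PySem.Str.startswith l "deleted file mode" = true
      · rw [hd, pv_del_not_hdr l hd]
        simp only [PySem.Str.startswith_eq] at hd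
        have edel : ("deleted file mode" : String).toList
            = ['d','e','l','e','t','e','d',' ','f','i','l','e',' ','m','o','d','e'] := rfl
        rw [edel] at hd
        simp [hd]
      · rw [Bool.not_eq_true] at hd
        rw [hd]
        by_cases hh : PySem.Str.startswith l "diff --git" = true
        · rw [hh]
          simp
        · rw [Bool.not_eq_true] at hh
          rw [hh, ih]
          simp only [PySem.Str.startswith_eq] at hd
          have edel : ("deleted file mode" : String).toList
              = ['d','e','l','e','t','e','d',' ','f','i','l','e',' ','m','o','d','e'] := rfl
          rw [edel] at hd
          simp [hd]

-- A's skip loop is exactly dropWhile not-header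
theorem pvASkip_eq (ls : List String) :
    pvASkip ls = ls.dropWhile (fun x => !PySem.Str.startswith x "diff --git") := by
  induction ls with
  | nil => simp [pvASkip]
  | cons l ls ih =>
    rw [pvASkip, List.dropWhile_cons]
    by_cases hh : PySem.Str.startswith l "diff --git" = true
    · rw [hh]
      simp
    · rw [Bool.not_eq_true] at hh
      rw [hh, ih]
      simp

-- A's scan just copies a run of non-header lines
theorem pvAScan_nonheader (t d : List String)
    (ht : ∀ x ∈ t, PySem.Str.startswith x "diff --git" = false) :
    pvAScan (t ++ d) = t ++ pvAScan d := by
  induction t with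
  | nil => simp
  | cons x t ih =>
    have hx : PySem.Str.startswith x "diff --git" = false := ht x (by simp)
    have ih' := ih (fun y hy => ht y (by simp [hy]))
    have hstep : pvAScan (x :: (t ++ d)) = x :: pvAScan (t ++ d) := by
      rw [pvAScan]
      by_cases hb : PySem.Str.startswith x "Binary files" = true
      · rw [if_pos hb]
      · rw [if_neg hb, if_neg (ne_true_of_eq_false hx)]
    rw [List.cons_append, hstep, ih', List.cons_append]

-- main equivalence on line lists, by strong induction on the length
theorem pv_main : ∀ (n : Nat) (ls : List String), ls.length ≤ n →
    pvAScan ls = (pvBSegs ls).flatMap pvBProc := by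
  intro n
  induction n with
  | zero =>
    intro ls hls
    have : ls = [] := List.eq_nil_of_length_eq_zero (Nat.le_zero.mp hls)
    simp [this, pvAScan, pvBSegs]
  | succ n ih =>
    intro ls hls
    match ls with
    | [] => simp [pvAScan, pvBSegs]
    | l :: ls' =>
      have hlen : ls'.length ≤ n := by simpa using hls
      have hsplit :
          ls'.takeWhile (fun x => !PySem.Str.startswith x "diff --git")
            ++ ls'.dropWhile (fun x => !PySem.Str.startswith x "diff --git") = ls' :=
        List.takeWhile_append_dropWhile
      have ihd := ih (ls'.dropWhile (fun x => !PySem.Str.startswith x "diff --git"))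
        (Nat.le_trans (List.length_dropWhile_le _ _) hlen)
      have htw : ∀ x ∈ ls'.takeWhile (fun x => !PySem.Str.startswith x "diff --git"),
          PySem.Str.startswith x "diff --git" = false := by
        intro x hx
        have := List.mem_takeWhile_imp hx
        simpa using this
      have hcopy : pvAScan ls'
          = ls'.takeWhile (fun x => !PySem.Str.startswith x "diff --git")
            ++ pvAScan (ls'.dropWhile (fun x => !PySem.Str.startswith x "diff --git")) := by
        conv_lhs => rw [← hsplit]
        exact pvAScan_nonheader _ _ htw
      rw [pvBSegs, List.flatMap_cons]
      by_cases hh : PySem.Str.startswith l "diff --git" = true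
      · have hb : ¬ PySem.Str.startswith l "Binary files" = true := by
          intro hb'
          rw [PySem.Str.startswith_eq, PySem.Chars.startswith_iff] at hh hb'
          obtain ⟨t1, h1⟩ := hh
          obtain ⟨t2, h2⟩ := hb'
          have e1 : ("diff --git" : String).toList
              = ['d','i','f','f',' ','-','-','g','i','t'] := rfl
          have e2 : ("Binary files" : String).toList
              = ['B','i','n','a','r','y',' ','f','i','l','e','s'] := rfl
          rw [e1] at h1; rw [e2] at h2
          have := h1.trans h2.symm
          simp at this
        rw [pvAScan, if_neg hb, if_pos hh, pvALook_eq]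
        by_cases hdel :
            ((ls'.takeWhile (fun x => !PySem.Str.startswith x "diff --git")).take 9).any
              (fun l => PySem.Str.startswith l "deleted file mode") = true
        · have hproc : pvBProc (l :: ls'.takeWhile (fun x => !PySem.Str.startswith x "diff --git"))
              = [l, "deleted file mode (content omitted)"] := by
            simp only [pvBProc, hh, hdel, Bool.true_and, if_true]
          rw [if_pos hdel, pvASkip_eq, ihd, hproc]
          rfl
        · rw [Bool.not_eq_true] at hdel
          have hproc : pvBProc (l :: ls'.takeWhile (fun x => !PySem.Str.startswith x "diff --git"))
              = l :: ls'.takeWhile (fun x => !PySem.Str.startswith x "diff --git") := by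
            simp only [pvBProc, hdel, Bool.and_false, Bool.false_eq_true, if_false]
          rw [if_neg (ne_true_of_eq_false hdel), hcopy, ihd, hproc, List.cons_append]
      · rw [Bool.not_eq_true] at hh
        have hstep : pvAScan (l :: ls') = l :: pvAScan ls' := by
          rw [pvAScan]
          by_cases hb : PySem.Str.startswith l "Binary files" = true
          · rw [if_pos hb]
          · rw [if_neg hb, if_neg (ne_true_of_eq_false hh)]
        have hproc : pvBProc (l :: ls'.takeWhile (fun x => !PySem.Str.startswith x "diff --git"))
            = l :: ls'.takeWhile (fun x => !PySem.Str.startswith x "diff --git") := by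
          simp only [pvBProc, hh, Bool.false_and, Bool.false_eq_true, if_false]
        rw [hstep, hcopy, ihd, hproc, List.cons_append]

-- ===== VERDICT (by name: the statement is the Claim_ definition above) =====
theorem filter_diff_noise_py_spec : Claim_equal_filter_diff_noise_py := by
  intro diff _
  unfold Spec_filter_diff_noise_py filter_diff_noise_py filter_diff_noise_py_alt
  by_cases h : diff = ""
  · simp [h]
  · simp only [h, if_false]
    rw [pv_main ((PySem.Str.split? diff "\n").getD []).length _ (Nat.le_refl _)]
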